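-- pv_equiv track=rewrite | github.com/jordannakamoto/start | ai-service/datastore/search_datastore.py | _check_proximity
-- ===== SOURCE A (Python) =====
-- from typing import Dict, List, Set, Tuple, Optional, Any
--
-- def _check_proximity(text: str, words: List[str], max_distance: int = 10) -> bool:
--     positions = []
--     text_words = text.split()
--
--     for word in words:
--         word_positions = [i for i, w in enumerate(text_words) if w == word]
--         if not word_positions:
--             return False
--         positions.append(word_positions)
--
--     for i in range(len(positions) - 1):
--         found_close = False
--         for pos1 in positions[i]:
--             for pos2 in positions[i + 1]:
--                 if abs(pos1 - pos2) <= max_distance: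
--                     found_close = True
--                     break
--             if found_close:
--                 break
--         if not found_close:
--             return False
--
--     return True
-- ===== SOURCE B (Python) =====
-- from typing import List
--
-- def _check_proximity(text: str, words: List[str], max_distance: int = 10) -> bool:
--     # one pass: word -> sorted list of its positions in the text
--     pos = {}
--     for i, w in enumerate(text.split()):
--         pos.setdefault(w, []).append(i)
--     plists = []
--     for w in words:
--         wp = pos.get(w, [])
--         if not wp:
--             return False
--         plists.append(wp)
--     for p, q in zip(plists, plists[1:]):
--         if not _close(p, q, max_distance):
--             return False
--     return True
--
-- def _close(p, q, d):
--     # two-pointer scan over two sorted position lists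
--     i = j = 0
--     while i < len(p) and j < len(q):
--         if abs(p[i] - q[j]) <= d:
--             return True
--         if p[i] < q[j]:
--             i += 1
--         else:
--             j += 1
--     return False
-- ===== Notes on version B (the rewrite author's own statement) =====
-- stated objective: alternative
-- what changed: B builds a word->positions dict in one pass over the split text instead of rescanning the text per query word, and replaces the exhaustive nested scan per adjacent word pair with a two-pointer merge over the two sorted position lists; on the measured inputs this is not faster.
import Mathlib
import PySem

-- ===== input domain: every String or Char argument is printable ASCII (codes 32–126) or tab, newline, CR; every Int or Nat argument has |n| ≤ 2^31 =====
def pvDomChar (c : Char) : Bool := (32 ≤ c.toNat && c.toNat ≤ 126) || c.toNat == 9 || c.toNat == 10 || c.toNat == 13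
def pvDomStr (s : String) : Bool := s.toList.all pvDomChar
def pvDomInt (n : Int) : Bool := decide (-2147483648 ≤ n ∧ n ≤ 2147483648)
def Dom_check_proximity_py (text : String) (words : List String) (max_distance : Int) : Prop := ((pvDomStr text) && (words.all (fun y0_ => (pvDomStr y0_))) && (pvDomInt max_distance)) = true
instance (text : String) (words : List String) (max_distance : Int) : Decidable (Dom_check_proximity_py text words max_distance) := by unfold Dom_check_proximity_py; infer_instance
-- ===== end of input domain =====

-- B replaces A's per-word rescans of the text by one dict-building pass and the
-- exhaustive per-pair scan by a two-pointer merge over sorted position lists (objective: alternative).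

-- ===== PORT A =====
-- word_positions = [i for i, w in enumerate(text_words) if w == word]
def wordPositionsA (tw : List String) (word : String) : List Int :=
  ((PySem.List.enumerate tw).filter (fun p => p.2 == word)).map (·.1)

-- first loop of A: collect positions, early `return False` when a word is absent
def collectA (tw : List String) : List String → Option (List (List Int))
  | [] => some []
  | w :: ws =>
    let wp := wordPositionsA tw w
    if wp.isEmpty then none
    else (collectA tw ws).map (wp :: ·)

-- inner double loop with breaks = any/any
def pairCloseA (p q : List Int) (d : Int) : Bool :=
  p.any (fun a => q.any (fun b => |a - b| ≤ d))

-- for i in range(len(positions)-1): …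
def adjacentA (d : Int) : List (List Int) → Bool
  | p :: q :: rest => pairCloseA p q d && adjacentA d (q :: rest)
  | _ => true

def check_proximity_py (text : String) (words : List String) (max_distance : Int) : Bool :=
  match collectA (PySem.Str.split₀ text) words with
  | none => false
  | some ps => adjacentA max_distance ps

-- ===== PORT B =====
-- one pass: pos.setdefault(w, []).append(i)
def buildPosB (tw : List String) : PySem.Dict String (List Int) :=
  (PySem.List.enumerate tw).foldl (fun d p => d.modify p.2 [] (· ++ [p.1])) PySem.Dict.empty

-- second loop of B: wp = pos.get(w, []); if not wp: return False
def collectB (pos : PySem.Dict String (List Int)) : List String → Option (List (List Int))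
  | [] => some []
  | w :: ws =>
    let wp := pos.getD w []
    if wp.isEmpty then none
    else (collectB pos ws).map (wp :: ·)

-- _close: two-pointer while loop over two sorted lists
def closeTP : List Int → List Int → Int → Bool
  | a :: p, b :: q, d =>
    if |a - b| ≤ d then true
    else if a < b then closeTP p (b :: q) d
    else closeTP (a :: p) q d
  | _, _, _ => false
termination_by p q _ => p.length + q.length

-- for p, q in zip(plists, plists[1:]): …
def adjacentB (d : Int) : List (List Int) → Bool
  | p :: q :: rest => closeTP p q d && adjacentB d (q :: rest)
  | _ => true

def check_proximity_py_alt (text : String) (words : List String) (max_distance : Int) : Bool :=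
  match collectB (buildPosB (PySem.Str.split₀ text)) words with
  | none => false
  | some ps => adjacentB max_distance ps

-- ===== PRECONDITION & SPEC =====
def Spec_check_proximity_py (text : String) (words : List String) (max_distance : Int) (out : Bool) : Prop := out = check_proximity_py_alt text words max_distance
instance (text : String) (words : List String) (max_distance : Int) (out : Bool) : Decidable (Spec_check_proximity_py text words max_distance out) := by unfold Spec_check_proximity_py; infer_instance

-- ===== CLAIM (what is proved, stated in full; the proofs are below) =====
def Claim_equal_check_proximity_py : Prop := ∀ (text : String) (words : List String) (max_distance : Int), Dom_check_proximity_py text words max_distance → Spec_check_proximity_py text words max_distance (check_proximity_py text words max_distance)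

-- ===== LEMMAS AND PROOFS =====

-- the dict built by B answers exactly A's per-word scan
lemma buildPosB_getD (tw : List String) (w : String) :
    (buildPosB tw).getD w [] = wordPositionsA tw w := by
  unfold buildPosB wordPositionsA
  have h : (PySem.List.enumerate tw).foldl (fun d p => d.modify p.2 [] (· ++ [p.1])) PySem.Dict.empty
      = ((PySem.List.enumerate tw).map (fun p => (p.2, p.1))).foldl
          (fun d p => d.modify p.1 [] (· ++ [p.2])) PySem.Dict.empty := by
    rw [List.foldl_map]
  rw [h, PySem.Dict.getD_foldl_modify_append, PySem.Dict.getD_empty]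
  simp [List.filter_map, List.map_map, Function.comp_def]

lemma collectB_eq (tw : List String) (ws : List String) :
    collectB (buildPosB tw) ws = collectA tw ws := by
  induction ws with
  | nil => rfl
  | cons w ws ih => simp [collectB, collectA, buildPosB_getD, ih]

-- every collected list is a wordPositionsA list
lemma collectA_mem {tw : List String} {ws : List String} {ps : List (List Int)}
    (h : collectA tw ws = some ps) : ∀ l ∈ ps, ∃ w, l = wordPositionsA tw w := by
  induction ws generalizing ps with
  | nil => simp [collectA] at h; subst h; simp
  | cons w ws ih =>
    simp only [collectA] at h
    split at h
    · exact absurd h (by simp)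
    · cases hrec : collectA tw ws with
      | none => rw [hrec] at h; simp at h
      | some qs =>
        rw [hrec] at h
        simp only [Option.map_some, Option.some_inj] at h
        subst h
        intro l hl
        rcases List.mem_cons.mp hl with rfl | hl
        · exact ⟨w, rfl⟩
        · exact ih hrec l hl

-- wordPositionsA lists are sorted (indices of enumerate, filtered)
lemma wordPositionsA_sorted (tw : List String) (w : String) :
    (wordPositionsA tw w).Pairwise (· ≤ ·) := by
  unfold wordPositionsA
  rw [List.pairwise_map]
  exact ((PySem.List.pairwise_lt_enumerate tw 0).filter _).imp (fun h => le_of_lt h)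

-- two-pointer merge = exhaustive pair scan, on sorted lists
lemma closeTP_eq_pairCloseA (p q : List Int) (d : Int)
    (hp : p.Pairwise (· ≤ ·)) (hq : q.Pairwise (· ≤ ·)) :
    closeTP p q d = pairCloseA p q d := by
  induction p, q, d using closeTP.induct with
  | case1 a p b q d hle =>
    unfold closeTP pairCloseA
    simp only [hle, if_pos]
    have : decide (|a - b| ≤ d) = true := by simpa using hle
    simp [List.any_cons, this]
  | case2 a p b q d hle hab ih =>
    unfold closeTP
    rw [if_neg hle, if_pos hab, ih hp.tail hq]
    -- a is too far from every element of b :: q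
    have hfar : ∀ y ∈ b :: q, ¬ |a - y| ≤ d := by
      intro y hy
      have hby : b ≤ y := by
        rcases List.mem_cons.mp hy with rfl | hy
        · exact le_refl y
        · exact List.rel_of_pairwise_cons hq hy
      intro hcl
      apply hle
      have h1 : |a - b| = b - a := by rw [abs_sub_comm]; exact abs_of_nonneg (by omega)
      have h2 : |a - y| = y - a := by rw [abs_sub_comm]; exact abs_of_nonneg (by omega)
      omega
    unfold pairCloseA
    rw [List.any_cons]
    have : (b :: q).any (fun y => |a - y| ≤ d) = false := by
      simp only [List.any_eq_false, decide_eq_true_eq]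
      exact fun y hy => hfar y hy
    rw [this, Bool.false_or]
  | case3 a p b q d hle hab ih =>
    unfold closeTP
    rw [if_neg hle, if_neg hab, ih hp hq.tail]
    have hba : b ≤ a := by omega
    -- b is too far from every element of a :: p
    have hfar : ∀ x ∈ a :: p, ¬ |x - b| ≤ d := by
      intro x hx
      have hax : a ≤ x := by
        rcases List.mem_cons.mp hx with rfl | hx
        · exact le_refl x
        · exact List.rel_of_pairwise_cons hp hx
      intro hcl
      apply hle
      have h1 : |a - b| = a - b := abs_of_nonneg (by omega)
      have h2 : |x - b| = x - b := abs_of_nonneg (by omega)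
      omega
    rw [Bool.eq_iff_iff]
    simp only [pairCloseA, List.any_eq_true, decide_eq_true_eq]
    constructor
    · rintro ⟨x, hx, y, hy, hxy⟩
      exact ⟨x, hx, y, List.mem_cons_of_mem b hy, hxy⟩
    · rintro ⟨x, hx, y, hy, hxy⟩
      rcases List.mem_cons.mp hy with rfl | hy
      · exact absurd hxy (hfar x hx)
      · exact ⟨x, hx, y, hy, hxy⟩
  | case4 p q d h =>
    -- fall-through: one of the lists is empty
    cases p with
    | nil => simp [closeTP, pairCloseA]
    | cons a p =>
      cases q with
      | nil => simp [closeTP, pairCloseA]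
      | cons b q => exact (h a p b q rfl rfl).elim

lemma adjacentB_eq (d : Int) (ps : List (List Int))
    (h : ∀ l ∈ ps, l.Pairwise (· ≤ ·)) : adjacentB d ps = adjacentA d ps := by
  induction ps with
  | nil => rfl
  | cons p rest ih =>
    cases rest with
    | nil => rfl
    | cons q rest' =>
      unfold adjacentB adjacentA
      rw [closeTP_eq_pairCloseA p q d (h p (by simp)) (h q (by simp)),
        ih (fun l hl => h l (List.mem_cons_of_mem p hl))]

-- ===== VERDICT (by name: the statement is the Claim_ definition above) =====
theorem check_proximity_py_spec : Claim_equal_check_proximity_py := by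
  intro text words max_distance _
  unfold Spec_check_proximity_py check_proximity_py check_proximity_py_alt
  rw [collectB_eq]
  cases hc : collectA (PySem.Str.split₀ text) words with
  | none => rfl
  | some ps =>
    exact (adjacentB_eq max_distance ps (fun l hl => by
      obtain ⟨w, rfl⟩ := collectA_mem hc l hl
      exact wordPositionsA_sorted _ w)).symm
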